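-- pv_equiv track=rewrite | github.com/nomad-coe/nomad-parser-crystal | crystalparser/versions/crystal14/mainparser.py | reorder
-- ===== SOURCE A (Python) =====
-- def reorder(array, dim):
--     ret = []
--     n = int(len(array) / dim)
--     if len(array) != n*dim:
--         raise Exception("reorder number of items does not match")
--     for i in range(0, n):
--         for j in range(0, dim):
--             ret.append(array[n*j + i])
--     return ret
-- ===== SOURCE B (Python) =====
-- def reorder(array, dim):
--     n = int(len(array) / dim)
--     if len(array) != n * dim:
--         raise Exception("reorder number of items does not match")
--     chunks = [array[j * n:(j + 1) * n] for j in range(dim)]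
--     ret = []
--     for col in zip(*chunks):
--         ret.extend(col)
--     return ret
-- ===== Notes on version B (the rewrite author's own statement) =====
-- stated objective: idiomatic
-- what changed: Replaces the nested index-arithmetic loops with slicing the flat array into dim contiguous chunks and transposing them with zip(*chunks), extending the result column by column.
import Mathlib
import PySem

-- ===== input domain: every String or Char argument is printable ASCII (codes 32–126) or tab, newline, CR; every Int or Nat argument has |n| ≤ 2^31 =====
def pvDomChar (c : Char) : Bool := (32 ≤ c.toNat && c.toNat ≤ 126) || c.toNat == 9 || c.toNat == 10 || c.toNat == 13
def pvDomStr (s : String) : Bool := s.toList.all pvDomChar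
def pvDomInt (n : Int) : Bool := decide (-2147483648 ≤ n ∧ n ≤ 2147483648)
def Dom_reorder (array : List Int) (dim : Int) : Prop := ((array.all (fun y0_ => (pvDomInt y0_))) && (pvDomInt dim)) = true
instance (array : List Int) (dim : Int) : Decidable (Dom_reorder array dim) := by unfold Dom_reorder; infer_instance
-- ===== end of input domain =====

-- B replaces A's nested index-arithmetic loops by slicing the array into dim contiguous
-- chunks and transposing them with zip(*chunks) (idiomatic; same cost).

-- ===== PORT A =====
def reorder (array : List Int) (dim : Int) : List Int :=
  let n : Int := PySem.Int.truncdiv (PySem.List.len array) dim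
  -- Python raises Exception when len(array) != n*dim (and ZeroDivisionError for dim == 0);
  -- those inputs are excluded by Pre_reorder, the port returns [] there.
  if PySem.List.len array ≠ n * dim then []
  else
    (PySem.List.pyRange 0 n 1).foldl
      (fun ret i =>
        (PySem.List.pyRange 0 dim 1).foldl
          (fun ret j => ret ++ [PySem.List.pyGetD array (n * j + i) 0]) ret) []

-- ===== PORT B =====
-- zip(*chunks): repeatedly take the column of heads until some list is exhausted
-- (zip of no iterables yields nothing).
def zipStar (ls : List (List Int)) : List (List Int) :=
  if h : ls.isEmpty = true ∨ ls.any (fun l => l.isEmpty) = true then []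
  else (ls.map (fun l => l.headD 0)) :: zipStar (ls.map (fun l => l.tail))
termination_by (ls.headD []).length
decreasing_by
  cases ls with
  | nil => exact absurd (Or.inl rfl) h
  | cons a rest =>
    have ha : a.length ≠ 0 := by
      intro hq
      exact h (Or.inr (by simp [List.length_eq_zero_iff.mp hq]))
    simp only [List.attach_cons, List.map_cons, List.headD_cons, List.length_tail]
    omega

def reorder_alt (array : List Int) (dim : Int) : List Int :=
  let n : Int := PySem.Int.truncdiv (PySem.List.len array) dim
  if PySem.List.len array ≠ n * dim then []
  else
    let chunks := (PySem.List.pyRange 0 dim 1).map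
      (fun j => PySem.List.slice array (some (j * n)) (some ((j + 1) * n)))
    (zipStar chunks).foldl (fun ret col => ret ++ col) []

-- ===== PRECONDITION & SPEC =====
-- Pre_ excludes exactly the inputs where Python raises: dim == 0 (ZeroDivisionError) and
-- dim not dividing len(array) exactly (the explicit Exception); A returns normally everywhere else.
def Pre_reorder (array : List Int) (dim : Int) : Prop :=
  dim ≠ 0 ∧ dim ∣ (array.length : Int)
instance (array : List Int) (dim : Int) : Decidable (Pre_reorder array dim) := by
  unfold Pre_reorder; infer_instance

def pvWitness_reorder : List Int × Int := ([1, 2, 3, 4], 2)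

def Spec_reorder (array : List Int) (dim : Int) (out : List Int) : Prop := out = reorder_alt array dim
instance (array : List Int) (dim : Int) (out : List Int) : Decidable (Spec_reorder array dim out) := by
  unfold Spec_reorder; infer_instance

-- ===== CLAIM (what is proved, stated in full; the proofs are below) =====
def Claim_equal_reorder : Prop := ∀ (array : List Int) (dim : Int), Dom_reorder array dim → Pre_reorder array dim → Spec_reorder array dim (reorder array dim)

-- ===== LEMMAS AND PROOFS =====

-- zip(*ls) of a nonempty family of lists, all of length m, is the m×|ls| transpose.
lemma zipStar_uniform (m : Nat) : ∀ (ls : List (List Int)), ls ≠ [] →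
    (∀ l ∈ ls, l.length = m) →
    zipStar ls = (List.range m).map (fun i => ls.map (fun l => l.getD i 0)) := by
  induction m with
  | zero =>
    intro ls hne hlen
    have hcond : ls.isEmpty = true ∨ ls.any (fun l => l.isEmpty) = true := by
      right
      cases ls with
      | nil => exact absurd rfl hne
      | cons a rest =>
        have : a.length = 0 := hlen a (by simp)
        simp [List.length_eq_zero_iff.mp this]
    rw [zipStar, dif_pos hcond]
    simp
  | succ m ih =>
    intro ls hne hlen
    have hcond : ¬ (ls.isEmpty = true ∨ ls.any (fun l => l.isEmpty) = true) := by
      rintro (h | h)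
      · exact hne (List.isEmpty_iff.mp h)
      · obtain ⟨l, hl, hle⟩ := List.any_eq_true.mp h
        have := hlen l hl
        rw [List.isEmpty_iff.mp hle] at this
        simp at this
    rw [zipStar, dif_neg hcond]
    have htne : ls.map (fun l => l.tail) ≠ [] := by
      simpa using hne
    have htlen : ∀ l ∈ ls.map (fun l => l.tail), l.length = m := by
      intro l hl
      obtain ⟨l', hl', rfl⟩ := List.mem_map.mp hl
      have := hlen l' hl'
      simp only [List.length_tail]
      omega
    rw [ih _ htne htlen]
    rw [List.range_succ_eq_map, List.map_cons]
    congr 1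
    · apply List.map_congr_left
      intro l _
      cases l <;> simp
    · rw [List.map_map]
      apply List.map_congr_left
      intro k _
      simp only [Function.comp, List.map_map]
      apply List.map_congr_left
      intro l _
      cases l <;> simp

-- A's nested append loops, flattened
lemma nested_foldl (ri rj : List Int) (g : Int → Int → Int) (acc : List Int) :
    ri.foldl (fun ret i => rj.foldl (fun ret j => ret ++ [g i j]) ret) acc
      = acc ++ ri.flatMap (fun i => rj.map (g i)) := by
  induction ri generalizing acc with
  | nil => simp
  | cons a tl ih =>
    rw [List.foldl_cons, PySem.List.foldl_append_singleton_eq_map, ih, List.flatMap_cons,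
      List.append_assoc]

-- B's column-extend loop is flatten
lemma foldl_extend (cols : List (List Int)) (acc : List Int) :
    cols.foldl (fun ret col => ret ++ col) acc = acc ++ cols.flatten := by
  induction cols generalizing acc with
  | nil => simp
  | cons c tl ih => simp [ih, List.append_assoc]

-- a chunk element: reading position i of the j-th chunk reads the flat array at j*N + i
lemma take_drop_getD (array : List Int) (jN N i : Nat) (hi : i < N) :
    ((array.drop jN).take N).getD i 0 = array.getD (jN + i) 0 := by
  simp only [List.getD, List.getElem?_take, hi, if_pos, List.getElem?_drop]

-- ===== VERDICT (by name: the statement is the Claim_ definition above) =====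
theorem reorder_spec : Claim_equal_reorder := by
  intro array dim _hdom hpre
  obtain ⟨h0, hdvd⟩ := hpre
  unfold Spec_reorder reorder reorder_alt
  simp only [PySem.List.len_eq]
  set L : Nat := array.length with hL
  obtain ⟨n, hn, hmul⟩ :
      ∃ n : Int, PySem.Int.truncdiv ((L : Int)) dim = n ∧ n * dim = (L : Int) := by
    refine ⟨_, rfl, ?_⟩
    have ht : PySem.Int.truncdiv ((L : Int)) dim = (L : Int) / dim := by
      simp only [PySem.Int.truncdiv, Int.tdiv_eq_ediv]
      simp
    rw [ht]
    exact Int.ediv_mul_cancel hdvd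
  rw [hn]
  rw [if_neg (not_not_intro hmul.symm), if_neg (not_not_intro hmul.symm)]
  rcases lt_trichotomy dim 0 with hneg | hz | hpos
  · -- dim < 0 : both sides are []
    have hnn : n ≤ 0 := by
      by_contra hc
      have hc' : 0 < n := not_le.mp hc
      nlinarith [Int.natCast_nonneg L]
    have hr1 : PySem.List.pyRange 0 n 1 = [] := by
      rw [PySem.List.pyRange_one]
      have h1 : (n - 0).toNat = 0 := by omega
      rw [h1]
      simp
    have hr2 : PySem.List.pyRange 0 dim 1 = [] := by
      rw [PySem.List.pyRange_one]
      have h2 : (dim - 0).toNat = 0 := by omega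
      rw [h2]
      simp
    rw [hr1, hr2]
    simp only [List.map_nil, List.foldl_nil]
    rw [zipStar]
    simp
  · exact absurd hz h0
  · -- 0 < dim
    obtain ⟨D, hD⟩ : ∃ D : Nat, dim = (D : Int) := ⟨dim.toNat, by omega⟩
    have hn0 : 0 ≤ n := by
      by_contra hc
      have hc' : n < 0 := not_le.mp hc
      nlinarith [Int.natCast_nonneg L]
    obtain ⟨N, hN⟩ : ∃ M : Nat, n = (M : Int) := ⟨n.toNat, by omega⟩
    have hD0 : 0 < D := by omega
    have hLeq : N * D = L := by
      have hc : ((N * D : Nat) : Int) = (L : Int) := by push_cast; rw [← hN, ← hD]; exact hmul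
      exact_mod_cast hc
    rw [hN, hD]
    rw [PySem.List.pyRange_zero_natCast, PySem.List.pyRange_zero_natCast]
    rw [nested_foldl (List.map (fun k => ((k : Nat) : Int)) (List.range N))
        (List.map (fun k => ((k : Nat) : Int)) (List.range D))
        (fun i j => PySem.List.pyGetD array ((N : Int) * j + i) 0) []]
    rw [List.nil_append]
    -- B-side: chunks are take/drop blocks
    have hchunk : (List.map (fun k => ((k : Nat) : Int)) (List.range D)).map
        (fun j => PySem.List.slice array (some (j * (N : Int))) (some ((j + 1) * (N : Int)))) =
        (List.range D).map (fun j => (array.drop (j * N)).take N) := by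
      rw [List.map_map]
      apply List.map_congr_left
      intro j _
      simp only [Function.comp]
      have h1 : ((j : Int) * (N : Int)) = ((j * N : Nat) : Int) := by push_cast; ring
      have h2 : (((j : Int) + 1) * (N : Int)) = ((j * N : Nat) : Int) + ((N : Nat) : Int) := by
        push_cast; ring
      rw [h1, h2, PySem.List.slice_natCast_add]
    rw [hchunk]
    have hcne : (List.range D).map (fun j => (array.drop (j * N)).take N) ≠ [] := by
      simp [List.map_eq_nil_iff, List.range_eq_nil]
      omega
    have hclen : ∀ l ∈ (List.range D).map (fun j => (array.drop (j * N)).take N), l.length = N := by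
      intro l hl
      obtain ⟨j, hj, rfl⟩ := List.mem_map.mp hl
      have hjD : j < D := List.mem_range.mp hj
      simp only [List.length_take, List.length_drop, ← hL]
      have hb : j * N + N ≤ L := by
        calc j * N + N = (j + 1) * N := by ring
          _ ≤ D * N := Nat.mul_le_mul_right N hjD
          _ = L := by rw [Nat.mul_comm]; exact hLeq
      omega
    rw [zipStar_uniform N _ hcne hclen]
    rw [foldl_extend, List.nil_append]
    -- both sides are flatMaps over List.range N; compare blockwise then elementwise
    simp only [List.flatMap_def, List.map_map]
    congr 1
    apply List.map_congr_left
    intro i hi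
    have hiN : i < N := List.mem_range.mp hi
    simp only [Function.comp]
    apply List.map_congr_left
    intro j hj
    have hjD : j < D := List.mem_range.mp hj
    simp only [Function.comp]
    have hcast : ((N : Int) * (j : Int) + (i : Int)) = ((j * N + i : Nat) : Int) := by
      push_cast; ring
    rw [hcast, PySem.List.pyGetD_natCast]
    exact (take_drop_getD array (j * N) N i hiN).symm
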